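-- pv_equiv track=rewrite | github.com/fuzekun/algorithms | codes/leetcodeP/math/leet793.py | preimageSizeFZF2
-- ===== SOURCE A (Python) =====
-- from _bisect import bisect_left
--
-- def preimageSizeFZF2(k: int) -> int:
--     def zeta(n:int)->int:
--
--         res = 0
--         while n:
--             n //= 5
--             res += n
--         return res
--     return 5 if zeta(bisect_left(range(5 * k) ,k, key=zeta)) == k else 0
-- ===== SOURCE B (Python) =====
-- def preimageSizeFZF2(k: int) -> int:
--     def zeta(n: int) -> int:
--         res = 0
--         while n:
--             n //= 5
--             res += n
--         return res
--     # greedy digit reconstruction: build the largest n (a multiple of 5)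
--     # with zeta(n) <= k, by descending powers of 5
--     p = 5
--     while p <= 4 * k:
--         p *= 5
--     n = 0
--     while p >= 5:
--         while zeta(n + p) <= k:
--             n += p
--         p //= 5
--     return 5 if zeta(n) == k else 0
-- ===== Notes on version B (the rewrite author's own statement) =====
-- stated objective: alternative
-- what changed: Replaces the library binary search (bisect_left over range(5*k) keyed by zeta) with a greedy reconstruction that builds the largest multiple of 5 whose zeta is at most k, digit by digit over descending powers of 5.
import Mathlib
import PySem

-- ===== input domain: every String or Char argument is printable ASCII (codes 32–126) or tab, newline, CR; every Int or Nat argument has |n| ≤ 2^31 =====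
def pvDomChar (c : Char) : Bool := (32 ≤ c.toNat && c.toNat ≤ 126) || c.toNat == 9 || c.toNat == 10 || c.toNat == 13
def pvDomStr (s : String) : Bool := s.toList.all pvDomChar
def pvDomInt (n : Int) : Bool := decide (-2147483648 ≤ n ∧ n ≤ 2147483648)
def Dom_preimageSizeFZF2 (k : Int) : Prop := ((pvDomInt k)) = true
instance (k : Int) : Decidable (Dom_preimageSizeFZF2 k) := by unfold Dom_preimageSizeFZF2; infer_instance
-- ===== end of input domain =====

-- B replaces A's library binary search (bisect_left over range(5*k) keyed by zeta) with a
-- greedy reconstruction over descending powers of 5 (alternative algorithm, similar cost).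

-- ===== PORT A =====
-- zeta is only ever applied to nonnegative ints (indices of range(5*k) and the bisect
-- result), so it is ported on Nat; the loop `res=0; while n: n//=5; res+=n` is exactly
-- `zeta n = n/5 + zeta (n/5)` with `zeta 0 = 0`.
def zeta (n : Nat) : Nat :=
  if n = 0 then 0 else n / 5 + zeta (n / 5)
decreasing_by exact Nat.div_lt_self (Nat.pos_of_ne_zero (by assumption)) (by norm_num)

-- CPython's bisect_left(a, x, key=key): lo=0, hi=len(a); while lo<hi: mid=(lo+hi)//2;
-- if key(a[mid]) < x: lo=mid+1 else hi=mid; return lo.  Here a = range(5*k), so a[mid]=mid.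
def bsearch (k : Int) (lo hi : Nat) : Nat :=
  if lo < hi then
    let mid := (lo + hi) / 2
    if (zeta mid : Int) < k then bsearch k (mid + 1) hi else bsearch k lo mid
  else lo
termination_by hi - lo
decreasing_by all_goals omega

-- len(range(5*k)) = max(5*k, 0) = (5*k).toNat
def preimageSizeFZF2 (k : Int) : Int :=
  let b := bsearch k 0 (5 * k).toNat
  if (zeta b : Int) = k then 5 else 0

-- ===== PORT B =====
-- `n/5 ≤ zeta n`, needed (only) for the termination of `fill` below
theorem zeta_div5_le (n : Nat) : n / 5 ≤ zeta n := by
  rw [zeta]; split <;> omega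

-- the inner loop `while zeta(n+p) <= k: n += p` of Source B; n and p are nonnegative ints
-- there, and p ≥ 5 whenever the loop runs (hp carries that invariant for termination)
def fill (k : Int) (p : Nat) (hp : 5 ≤ p) (n : Nat) : Nat :=
  if (zeta (n + p) : Int) ≤ k then fill k p hp (n + p) else n
termination_by 5 * k.toNat + 5 - n
decreasing_by
  have h1 : (n + p) / 5 ≤ zeta (n + p) := zeta_div5_le (n + p)
  omega

-- the outer loop `while p >= 5: (inner loop); p //= 5`
def outer (k : Int) (p : Nat) (n : Nat) : Nat :=
  if h : 5 ≤ p then outer k (p / 5) (fill k p h n) else n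
termination_by p
decreasing_by exact Nat.div_lt_self (by omega) (by norm_num)

-- `p = 5; while p <= 4*k: p *= 5`; the `0 < p` conjunct is only a totality guard
-- (p starts at the literal 5 and only grows, so it always holds at every call)
def pow5 (k : Int) (p : Nat) : Nat :=
  if 0 < p ∧ (p : Int) ≤ 4 * k then pow5 k (5 * p) else p
termination_by (4 * k + 1 - p).toNat
decreasing_by omega

def preimageSizeFZF2_alt (k : Int) : Int :=
  let n := outer k (pow5 k 5) 0
  if (zeta n : Int) = k then 5 else 0

-- ===== PRECONDITION & SPEC =====
def Spec_preimageSizeFZF2 (k : Int) (out : Int) : Prop := out = preimageSizeFZF2_alt k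
instance (k : Int) (out : Int) : Decidable (Spec_preimageSizeFZF2 k out) := by unfold Spec_preimageSizeFZF2; infer_instance

-- ===== CLAIM (what is proved, stated in full; the proofs are below) =====
def Claim_equal_preimageSizeFZF2 : Prop := ∀ (k : Int), Dom_preimageSizeFZF2 k → Spec_preimageSizeFZF2 k (preimageSizeFZF2 k)

-- ===== LEMMAS AND PROOFS =====

theorem zeta_zero : zeta 0 = 0 := by rw [zeta]; norm_num

theorem zeta_unfold (n : Nat) : zeta n = n / 5 + zeta (n / 5) := by
  rw [zeta]
  split
  · subst n; simp [zeta_zero]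
  · rfl

theorem zeta_mono : ∀ {a b : Nat}, a ≤ b → zeta a ≤ zeta b := by
  intro a b
  induction b using Nat.strong_induction_on generalizing a with
  | _ b ih =>
    intro hab
    rcases Nat.eq_zero_or_pos b with hb | hb
    · subst hb
      have ha0 : a = 0 := by omega
      subst ha0
      exact le_refl _
    rcases Nat.eq_zero_or_pos a with ha | ha
    · subst ha; rw [zeta_zero]; omega
    rw [zeta_unfold a, zeta_unfold b]
    have h5 : a / 5 ≤ b / 5 := Nat.div_le_div_right hab
    have := ih (b / 5) (Nat.div_lt_self hb (by norm_num)) h5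
    omega

theorem zeta_5mul (m : Nat) : zeta (5 * m) = m + zeta m := by
  rw [zeta_unfold (5 * m), Nat.mul_div_cancel_left m (by norm_num : 0 < 5)]

-- bsearch keeps zeta < K strictly below the returned index and zeta ≥ K from it on
theorem bsearch_inv (K : Nat) : ∀ lo hi : Nat, lo ≤ hi →
    (∀ i < lo, zeta i < K) → (∀ i, hi ≤ i → K ≤ zeta i) →
    (∀ i < bsearch (K : Int) lo hi, zeta i < K) ∧
    (∀ i, bsearch (K : Int) lo hi ≤ i → K ≤ zeta i) := by
  intro lo hi
  fun_induction bsearch (K : Int) lo hi with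
  | case1 lo hi hlt mid hz ih =>
    intro _ h1 h2
    have hzn : zeta mid < K := by exact_mod_cast hz
    refine ih (by omega) ?_ h2
    intro i hi'
    exact lt_of_le_of_lt (zeta_mono (by omega : i ≤ mid)) hzn
  | case2 lo hi hlt mid hz ih =>
    intro _ h1 h2
    have hzn : K ≤ zeta mid := by
      have h' : ¬ ((zeta mid : Int) < (K : Int)) := hz
      exact_mod_cast not_lt.mp h'
    refine ih (by omega) h1 ?_
    intro i hi'
    exact le_trans hzn (zeta_mono hi')
  | case3 lo hi hge =>
    intro hlohi h1 h2
    have : lo = hi := by omega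
    subst this
    exact ⟨h1, h2⟩

-- A returns 5 exactly when K is a value of zeta (and 0 otherwise)
theorem portA_char (K : Nat) (hex : ∃ n, zeta n = K) : preimageSizeFZF2 (K : Int) = 5 := by
  unfold preimageSizeFZF2
  have hlen : ((5 * (K : Int)).toNat) = 5 * K := by omega
  rw [hlen]
  have hinv := bsearch_inv K 0 (5 * K) (by omega) (by omega)
    (by
      intro i hi
      have h1 : zeta (5 * K) = K + zeta K := zeta_5mul K
      have := zeta_mono hi
      omega)
  obtain ⟨hlo, hhi⟩ := hinv
  set r := bsearch (K : Int) 0 (5 * K) with hr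
  have hge : K ≤ zeta r := hhi r (le_refl r)
  obtain ⟨n, hn⟩ := hex
  have hnr : r ≤ n := by
    by_contra h
    have := hlo n (by omega)
    omega
  have hle : zeta r ≤ K := hn ▸ zeta_mono hnr
  have : (zeta r : Int) = (K : Int) := by omega
  rw [if_pos this]

theorem portA_char0 (K : Nat) (hex : ¬ ∃ n, zeta n = K) : preimageSizeFZF2 (K : Int) = 0 := by
  unfold preimageSizeFZF2
  rw [if_neg]
  intro h
  exact hex ⟨bsearch (K : Int) 0 (5 * (K : Int)).toNat, by exact_mod_cast h⟩

-- the inner loop adds multiples of p, keeps zeta ≤ K, and saturates: zeta(result+p) > K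
theorem fill_inv (K p : Nat) (hp : 5 ≤ p) : ∀ n, zeta n ≤ K →
    (∃ c, fill (K : Int) p hp n = n + c * p) ∧
    zeta (fill (K : Int) p hp n) ≤ K ∧
    K < zeta (fill (K : Int) p hp n + p) := by
  intro n
  fun_induction fill (K : Int) p hp n with
  | case1 n hz ih =>
    intro hn
    have hzn : zeta (n + p) ≤ K := by exact_mod_cast hz
    obtain ⟨⟨c, hc⟩, h2, h3⟩ := ih hzn
    exact ⟨⟨c + 1, by rw [hc]; ring⟩, h2, h3⟩
  | case2 n hz =>
    intro hn
    have h' : ¬ ((zeta (n + p) : Int) ≤ (K : Int)) := hz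
    exact ⟨⟨0, by omega⟩, hn, by exact_mod_cast not_le.mp h'⟩

-- the outer loop, started at any power 5^(j+1) with n a multiple of it and zeta n ≤ K,
-- ends at a multiple N of 5 with zeta N ≤ K that bounds every m with zeta m ≤ K by N+5
theorem outer_inv (K : Nat) : ∀ (p : Nat) (n : Nat), (∃ j, p = 5 ^ (j + 1)) → p ∣ n →
    zeta n ≤ K →
    5 ∣ outer (K : Int) p n ∧
    zeta (outer (K : Int) p n) ≤ K ∧
    (∀ m, zeta m ≤ K → m < outer (K : Int) p n + 5) := by
  intro p n
  fun_induction outer (K : Int) p n with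
  | case1 p n h ih =>
    intro hj hdvd hz
    obtain ⟨j, hpj⟩ := hj
    obtain ⟨⟨c, hc⟩, h2, h3⟩ := fill_inv K p h n hz
    set n' := fill (K : Int) p h n with hn'
    match j, hpj with
    | 0, hpj =>
      have hp5 : p = 5 := by rw [hpj]; norm_num
      subst hp5
      have h51 : (5 : Nat) / 5 = 1 := by norm_num
      rw [h51, outer, dif_neg (by norm_num)]
      refine ⟨by omega, h2, ?_⟩
      intro m hm
      by_contra hcon
      have hge : n' + 5 ≤ m := by omega
      have := zeta_mono hge
      omega
    | j + 1, hpj =>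
      have hdiv : p / 5 = 5 ^ (j + 1) := by
        rw [hpj, pow_succ]
        exact Nat.mul_div_cancel _ (by norm_num)
      refine ih ⟨j, hdiv⟩ ?_ h2
      have hd1 : p / 5 ∣ p := by rw [hdiv, hpj, pow_succ]; exact dvd_mul_right (5 ^ (j + 1)) 5
      rw [hc]
      exact Nat.dvd_add (dvd_trans hd1 hdvd) (Dvd.dvd.mul_left hd1 c)
  | case2 p n h =>
    intro hj hdvd hz
    obtain ⟨j, hpj⟩ := hj
    exfalso
    have : (5 : Nat) ≤ 5 ^ (j + 1) := by
      calc (5 : Nat) = 5 ^ 1 := by norm_num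
        _ ≤ 5 ^ (j + 1) := Nat.pow_le_pow_right (by norm_num) (by omega)
    omega

-- the start-power loop returns a power 5^(j+1)
theorem pow5_pow (k : Int) : ∀ (p : Nat), (∃ j, p = 5 ^ (j + 1)) →
    ∃ j', pow5 k p = 5 ^ (j' + 1) := by
  intro p
  fun_induction pow5 k p with
  | case1 p h ih =>
    intro ⟨j, hj⟩
    refine ih ⟨j + 1, ?_⟩
    rw [hj]
    exact (pow_succ' 5 (j + 1)).symm
  | case2 p h =>
    exact fun hj => hj

theorem portB_char (K : Nat) (hex : ∃ n, zeta n = K) : preimageSizeFZF2_alt (K : Int) = 5 := by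
  unfold preimageSizeFZF2_alt
  obtain ⟨j, hP⟩ := pow5_pow (K : Int) 5 ⟨0, by norm_num⟩
  obtain ⟨hN1, hN2, hN3⟩ := outer_inv K (pow5 (K : Int) 5) 0 ⟨j, hP⟩
    (dvd_zero _) (by rw [zeta_zero]; omega)
  set N := outer (K : Int) (pow5 (K : Int) 5) 0 with hNdef
  obtain ⟨n, hn⟩ := hex
  have hlt : n < N + 5 := hN3 n (by omega)
  have hNK : zeta N = K := by
    by_contra hne
    have hNlt : zeta N < K := by omega
    have hnN : N < n := by
      by_contra hcon
      have := zeta_mono (show n ≤ N by omega)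
      omega
    have hdiveq : n / 5 = N / 5 := by omega
    have h1 := zeta_unfold n
    have h2 := zeta_unfold N
    rw [hdiveq] at h1
    omega
  rw [if_pos (by exact_mod_cast hNK)]

theorem portB_char0 (K : Nat) (hex : ¬ ∃ n, zeta n = K) : preimageSizeFZF2_alt (K : Int) = 0 := by
  unfold preimageSizeFZF2_alt
  rw [if_neg]
  intro h
  exact hex ⟨_, by exact_mod_cast h⟩

theorem zeta_five : zeta 5 = 1 := by
  rw [zeta_unfold, zeta_unfold 1, zeta_zero]

-- for k < 0 both programs return 0
theorem neg_case (k : Int) (hk : k < 0) :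
    preimageSizeFZF2 k = 0 ∧ preimageSizeFZF2_alt k = 0 := by
  constructor
  · unfold preimageSizeFZF2
    have hlen : ((5 * k).toNat) = 0 := by omega
    have hb : bsearch k 0 0 = 0 := by rw [bsearch]; simp
    rw [hlen, hb]
    show (if ((zeta 0 : Nat) : Int) = k then (5 : Int) else 0) = 0
    rw [zeta_zero, if_neg (by omega)]
  · unfold preimageSizeFZF2_alt
    have hpow : pow5 k 5 = 5 := by
      rw [pow5, if_neg (by omega)]
    have h15 : ¬ ((zeta (0 + 5) : Nat) : Int) ≤ k := by
      rw [show (0 + 5 : Nat) = 5 from rfl, zeta_five]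
      omega
    have hfill : fill k 5 (le_refl 5) 0 = 0 := by
      rw [fill, if_neg h15]
    have houter : outer k (pow5 k 5) 0 = 0 := by
      rw [hpow, outer, dif_pos (le_refl 5), hfill,
        show (5 : Nat) / 5 = 1 by norm_num, outer, dif_neg (by norm_num)]
    rw [houter]
    show (if ((zeta 0 : Nat) : Int) = k then (5 : Int) else 0) = 0
    rw [zeta_zero, if_neg (by omega)]

-- ===== VERDICT (by name: the statement is the Claim_ definition above) =====
theorem preimageSizeFZF2_spec : Claim_equal_preimageSizeFZF2 := by
  intro k _
  unfold Spec_preimageSizeFZF2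
  rcases lt_or_ge k 0 with hk | hk
  · obtain ⟨h1, h2⟩ := neg_case k hk
    rw [h1, h2]
  · obtain ⟨K, rfl⟩ : ∃ K : Nat, k = (K : Int) := ⟨k.toNat, by omega⟩
    by_cases hex : ∃ n, zeta n = K
    · rw [portA_char K hex, portB_char K hex]
    · rw [portA_char0 K hex, portB_char0 K hex]
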